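-- pv_equiv track=rewrite | github.com/cptx032/cee | plugins/defer_plugin.py | get_valid_indexes
-- ===== SOURCE A (Python) =====
-- def get_valid_indexes(
--     ignore_regions: list[tuple[int, int]], indexes: list[int]
-- ) -> list[int]:
--     return [
--         index
--         for index in indexes
--         if not any(start <= index <= end for start, end in ignore_regions)
--     ]
-- ===== SOURCE B (Python) =====
-- def get_valid_indexes(
--     ignore_regions: list[tuple[int, int]], indexes: list[int]
-- ) -> list[int]:
--     # Sort regions by start and merge overlapping ones into disjoint intervals.
--     regs = sorted(ignore_regions, key=lambda r: r[0])
--     merged = []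
--     for s, e in regs:
--         if merged and s <= merged[-1][1]:
--             if e > merged[-1][1]:
--                 merged[-1] = (merged[-1][0], e)
--         else:
--             merged.append((s, e))
--     out = []
--     for i in indexes:
--         ok = True
--         for s, e in merged:
--             if s > i:
--                 break
--             if i <= e:
--                 ok = False
--                 break
--         if ok:
--             out.append(i)
--     return out
-- ===== Notes on version B (the rewrite author's own statement) =====
-- stated objective: faster
-- what changed: Instead of testing every index against every region, B sorts the regions by start once, merges them into disjoint intervals, and checks each index with an ordered early-exit scan over the merged list.
import Mathlib
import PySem

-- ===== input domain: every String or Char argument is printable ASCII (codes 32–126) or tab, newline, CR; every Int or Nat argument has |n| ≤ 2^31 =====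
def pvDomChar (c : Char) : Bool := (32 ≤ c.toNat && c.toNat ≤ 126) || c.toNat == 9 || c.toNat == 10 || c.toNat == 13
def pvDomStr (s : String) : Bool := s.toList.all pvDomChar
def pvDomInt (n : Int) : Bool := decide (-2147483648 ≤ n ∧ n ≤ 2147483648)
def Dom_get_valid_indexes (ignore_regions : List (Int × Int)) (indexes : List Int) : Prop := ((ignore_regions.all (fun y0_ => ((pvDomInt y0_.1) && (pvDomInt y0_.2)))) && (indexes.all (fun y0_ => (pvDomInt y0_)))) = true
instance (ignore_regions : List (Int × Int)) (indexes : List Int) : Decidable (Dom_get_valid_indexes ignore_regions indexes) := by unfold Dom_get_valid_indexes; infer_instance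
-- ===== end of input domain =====

-- B replaces A's scan of every region per index by sort-merge-once plus an ordered
-- early-exit scan of the disjoint merged intervals (objective: faster, constant-factor).

-- ===== PORT A =====
def get_valid_indexes (ignore_regions : List (Int × Int)) (indexes : List Int) : List Int :=
  indexes.filter (fun index =>
    !(ignore_regions.any (fun r => decide (r.1 ≤ index) && decide (index ≤ r.2))))

-- ===== PORT B =====
-- the `for s, e in regs` merging loop, carrying the currently open interval (s, e)
def pvMergeLoop (s e : Int) : List (Int × Int) → List (Int × Int)
  | [] => [(s, e)]
  | (s', e') :: rest =>
      if s' ≤ e then pvMergeLoop s (max e e') rest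
      else (s, e) :: pvMergeLoop s' e' rest

def pvMerge : List (Int × Int) → List (Int × Int)
  | [] => []
  | (s, e) :: rest => pvMergeLoop s e rest

-- the inner `for s, e in merged` loop with its two breaks
def pvScan (i : Int) : List (Int × Int) → Bool
  | [] => true
  | (s, e) :: rest =>
      if s > i then true
      else if i ≤ e then false
      else pvScan i rest

def get_valid_indexes_alt (ignore_regions : List (Int × Int)) (indexes : List Int) : List Int :=
  let merged := pvMerge (PySem.List.sorted ignore_regions (fun r => r.1) false)
  indexes.filter (fun i => pvScan i merged)

-- ===== PRECONDITION & SPEC =====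
def Spec_get_valid_indexes (ignore_regions : List (Int × Int)) (indexes : List Int) (out : List Int) : Prop := out = get_valid_indexes_alt ignore_regions indexes
instance (ignore_regions : List (Int × Int)) (indexes : List Int) (out : List Int) : Decidable (Spec_get_valid_indexes ignore_regions indexes out) := by unfold Spec_get_valid_indexes; infer_instance

-- ===== CLAIM (what is proved, stated in full; the proofs are below) =====
def Claim_equal_get_valid_indexes : Prop := ∀ (ignore_regions : List (Int × Int)) (indexes : List Int), Dom_get_valid_indexes ignore_regions indexes → Spec_get_valid_indexes ignore_regions indexes (get_valid_indexes ignore_regions indexes)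

-- ===== LEMMAS AND PROOFS =====

-- "index i is covered by some interval of l"
def pvCov (i : Int) (l : List (Int × Int)) : Prop := ∃ r ∈ l, r.1 ≤ i ∧ i ≤ r.2

-- starts of the merged list are nondecreasing
theorem pvMergeLoop_pairwise (s e : Int) (l : List (Int × Int))
    (hs : ∀ r ∈ l, s ≤ r.1) (hp : l.Pairwise (fun a b => a.1 ≤ b.1)) :
    (pvMergeLoop s e l).Pairwise (fun a b => a.1 ≤ b.1) := by
  induction l generalizing s e with
  | nil => simp [pvMergeLoop]
  | cons hd tl ih =>
    obtain ⟨s', e'⟩ := hd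
    rw [List.pairwise_cons] at hp
    simp only [pvMergeLoop]
    split
    · exact ih s (max e e') (fun r hr => le_trans (hs (s', e') List.mem_cons_self) (hp.1 r hr)) hp.2
    · rw [List.pairwise_cons]
      refine ⟨?_, ih s' e' hp.1 hp.2⟩
      intro r hr
      -- every start in the merged tail comes from (s',e')::tl
      have : ∀ (a b : Int) (m : List (Int × Int)), r ∈ pvMergeLoop a b m →
          r.1 = a ∨ ∃ q ∈ m, r.1 = q.1 := by
        intro a b m
        induction m generalizing a b with
        | nil =>
          intro hmem
          simp only [pvMergeLoop, List.mem_singleton] at hmem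
          exact Or.inl (by rw [hmem])
        | cons h2 t2 ih2 =>
          obtain ⟨a2, b2⟩ := h2
          simp only [pvMergeLoop]
          split
          · intro hmem
            rcases ih2 a (max b b2) hmem with h | ⟨q, hq, hq1⟩
            · exact Or.inl h
            · exact Or.inr ⟨q, List.mem_cons_of_mem _ hq, hq1⟩
          · intro hmem
            rcases List.mem_cons.1 hmem with h | h
            · exact Or.inl (by rw [h])
            · rcases ih2 a2 b2 h with h' | ⟨q, hq, hq1⟩
              · exact Or.inr ⟨(a2, b2), List.mem_cons_self, h'⟩
              · exact Or.inr ⟨q, List.mem_cons_of_mem _ hq, hq1⟩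
      rcases this s' e' tl hr with h | ⟨q, hq, hq1⟩
      · rw [h]; exact hs (s', e') List.mem_cons_self
      · rw [hq1]; exact le_trans (hs (s', e') List.mem_cons_self) (hp.1 q hq)

-- merging preserves coverage
theorem pvMergeLoop_cov (i s e : Int) (l : List (Int × Int))
    (hs : ∀ r ∈ l, s ≤ r.1) (hp : l.Pairwise (fun a b => a.1 ≤ b.1)) :
    (pvCov i (pvMergeLoop s e l) ↔ (s ≤ i ∧ i ≤ e) ∨ pvCov i l) := by
  induction l generalizing s e with
  | nil => simp [pvMergeLoop, pvCov]
  | cons hd tl ih =>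
    obtain ⟨s', e'⟩ := hd
    have hss' : s ≤ s' := hs (s', e') List.mem_cons_self
    rw [List.pairwise_cons] at hp
    simp only [pvMergeLoop]
    split
    · rename_i hle
      rw [ih s (max e e') (fun r hr => le_trans hss' (hp.1 r hr)) hp.2]
      constructor
      · rintro (⟨h1, h2⟩ | h)
        · rcases le_max_iff.1 h2 with h2 | h2
          · exact Or.inl ⟨h1, h2⟩
          · by_cases hie : i ≤ e
            · exact Or.inl ⟨h1, hie⟩
            · exact Or.inr ⟨(s', e'), by simp, by omega, h2⟩
        · rcases h with ⟨r, hr, hr1, hr2⟩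
          exact Or.inr ⟨r, by simp [hr], hr1, hr2⟩
      · rintro (⟨h1, h2⟩ | ⟨r, hr, hr1, hr2⟩)
        · exact Or.inl ⟨h1, le_max_of_le_left h2⟩
        · rcases List.mem_cons.1 hr with rfl | hr
          · exact Or.inl ⟨le_trans hss' hr1, le_max_of_le_right hr2⟩
          · exact Or.inr ⟨r, hr, hr1, hr2⟩
    · have hcons : pvCov i ((s, e) :: pvMergeLoop s' e' tl) ↔
          (s ≤ i ∧ i ≤ e) ∨ pvCov i (pvMergeLoop s' e' tl) := by
        constructor
        · rintro ⟨r, hr, hr1, hr2⟩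
          rcases List.mem_cons.1 hr with rfl | hr
          · exact Or.inl ⟨hr1, hr2⟩
          · exact Or.inr ⟨r, hr, hr1, hr2⟩
        · rintro (⟨h1, h2⟩ | ⟨r, hr, hr1, hr2⟩)
          · exact ⟨(s, e), by simp, h1, h2⟩
          · exact ⟨r, by simp [hr], hr1, hr2⟩
      rw [hcons, ih s' e' hp.1 hp.2]
      constructor
      · rintro (h | (h | ⟨r, hr, hr1, hr2⟩))
        · exact Or.inl h
        · exact Or.inr ⟨(s', e'), by simp, h.1, h.2⟩
        · exact Or.inr ⟨r, by simp [hr], hr1, hr2⟩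
      · rintro (h | ⟨r, hr, hr1, hr2⟩)
        · exact Or.inl h
        · rcases List.mem_cons.1 hr with rfl | hr
          · exact Or.inr (Or.inl ⟨hr1, hr2⟩)
          · exact Or.inr (Or.inr ⟨r, hr, hr1, hr2⟩)

-- scan over a start-sorted list decides non-coverage
theorem pvScan_iff (i : Int) (l : List (Int × Int))
    (hp : l.Pairwise (fun a b => a.1 ≤ b.1)) :
    (pvScan i l = true ↔ ¬ pvCov i l) := by
  induction l with
  | nil => simp [pvScan, pvCov]
  | cons hd tl ih =>
    obtain ⟨s, e⟩ := hd
    rw [List.pairwise_cons] at hp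
    simp only [pvScan]
    split
    · rename_i hgt
      simp only [true_iff]
      rintro ⟨r, hr, hr1, hr2⟩
      rcases List.mem_cons.1 hr with rfl | hr
      · omega
      · have := hp.1 r hr; omega
    · rename_i hle
      split
      · rename_i hie
        exact iff_of_false (by simp) (not_not_intro ⟨(s, e), List.mem_cons_self, by omega, hie⟩)
      · rename_i hie
        rw [ih hp.2]
        constructor
        · rintro h ⟨r, hr, hr1, hr2⟩
          rcases List.mem_cons.1 hr with rfl | hr
          · omega
          · exact h ⟨r, hr, hr1, hr2⟩
        · intro h hc
          rcases hc with ⟨r, hr, hr1, hr2⟩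
          exact h ⟨r, by simp [hr], hr1, hr2⟩

-- the merged list of a start-sorted list: sorted starts, same coverage
theorem pvMerge_pairwise (l : List (Int × Int)) (hp : l.Pairwise (fun a b => a.1 ≤ b.1)) :
    (pvMerge l).Pairwise (fun a b => a.1 ≤ b.1) := by
  cases l with
  | nil => simp [pvMerge]
  | cons hd tl =>
    obtain ⟨s, e⟩ := hd
    rw [List.pairwise_cons] at hp
    exact pvMergeLoop_pairwise s e tl hp.1 hp.2

theorem pvMerge_cov (i : Int) (l : List (Int × Int)) (hp : l.Pairwise (fun a b => a.1 ≤ b.1)) :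
    (pvCov i (pvMerge l) ↔ pvCov i l) := by
  cases l with
  | nil => simp [pvMerge]
  | cons hd tl =>
    obtain ⟨s, e⟩ := hd
    rw [List.pairwise_cons] at hp
    rw [show pvMerge ((s, e) :: tl) = pvMergeLoop s e tl from rfl,
        pvMergeLoop_cov i s e tl hp.1 hp.2]
    constructor
    · rintro (h | ⟨r, hr, hr1, hr2⟩)
      · exact ⟨(s, e), by simp, h.1, h.2⟩
      · exact ⟨r, by simp [hr], hr1, hr2⟩
    · rintro ⟨r, hr, hr1, hr2⟩
      rcases List.mem_cons.1 hr with rfl | hr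
      · exact Or.inl ⟨hr1, hr2⟩
      · exact Or.inr ⟨r, hr, hr1, hr2⟩

-- ===== VERDICT (by name: the statement is the Claim_ definition above) =====
theorem get_valid_indexes_spec : Claim_equal_get_valid_indexes := by
  intro regs idxs _
  show get_valid_indexes regs idxs = get_valid_indexes_alt regs idxs
  unfold get_valid_indexes get_valid_indexes_alt
  apply List.filter_congr
  intro i _
  set srt := PySem.List.sorted regs (fun r => r.1) false with hsrt
  have hp : srt.Pairwise (fun a b => a.1 ≤ b.1) := PySem.List.sorted_pairwise regs _
  have hscan := pvScan_iff i (pvMerge srt) (pvMerge_pairwise srt hp)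
  have hcov : pvCov i (pvMerge srt) ↔ pvCov i regs := by
    rw [pvMerge_cov i srt hp]
    unfold pvCov
    constructor
    · rintro ⟨r, hr, h⟩
      exact ⟨r, (PySem.List.mem_sorted _ _ _ _).1 hr, h⟩
    · rintro ⟨r, hr, h⟩
      exact ⟨r, (PySem.List.mem_sorted _ _ _ _).2 hr, h⟩
  have hany : (regs.any (fun r => decide (r.1 ≤ i) && decide (i ≤ r.2)) = true)
      ↔ pvCov i regs := by
    simp [pvCov, List.any_eq_true]
  cases hb : regs.any (fun r => decide (r.1 ≤ i) && decide (i ≤ r.2)) with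
  | true =>
    have hf : pvScan i (pvMerge srt) = false := by
      cases hsc : pvScan i (pvMerge srt) with
      | false => rfl
      | true => exact absurd (hcov.2 (hany.1 hb)) (hscan.1 hsc)
    simp [hf]
  | false =>
    have ht : pvScan i (pvMerge srt) = true := by
      rw [hscan]; intro h
      exact absurd (hany.2 (hcov.1 h)) (by simp [hb])
    simp [ht]
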